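-- pv_equiv track=rewrite | github.com/IchBinJade/advent-of-code-python | 2025/day04.py | part_two
-- ===== SOURCE A (Python) =====
-- from collections import deque
--
-- DIRECTIONS = [(-1, -1), (-1, 0), (-1, 1), (0, -1), (0, 1), (1, -1),  (1, 0),  (1, 1)]
--
-- def check_neighbours(grid, row, col):
--     count = 0
--
--     for dr, dc in DIRECTIONS:
--         nr, nc = row + dr, col + dc
--         if (0 <= nr < len(grid)) and (0 <= nc < len(grid[0])):
--             if grid[nr][nc] == "@":
--                 count += 1
--                 if count > 3:
--                     return count
--
--     return count
--
-- def do_removals(grid, queue):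
--     removed = 0
--
--     while queue:
--         cr, cc = queue.popleft()
--         removed += 1
--         grid[cr][cc] = "."
--
--         for dr, dc in DIRECTIONS:
--             nr, nc = cr + dr, cc + dc
--             if (0 <= nr < len(grid)) and (0 <= nc < len(grid[0])):
--                 if grid[nr][nc] == "@" and (check_neighbours(grid, nr, nc) < 4):
--                     if (nr, nc) not in queue:
--                         queue.append((nr, nc))
--
--     return removed
--
-- def part_two(data_input):
--     grid = [list(row) for row in data_input]
--     queue = deque()
--
--     # Initial scan of boxes
--     for cr in range(len(grid)):
--         for cc in range(len(grid[0])):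
--             if grid[cr][cc] == "@" and (check_neighbours(grid, cr, cc) < 4):
--                 queue.append((cr,cc))
--
--     total = do_removals(grid, queue)
--
--     return total
-- ===== SOURCE B (Python) =====
-- DIRECTIONS = [(-1, -1), (-1, 0), (-1, 1), (0, -1), (0, 1), (1, -1), (1, 0), (1, 1)]
--
-- def part_two(data_input):
--     w = len(data_input[0]) if data_input else 0
--     grid = [list(row) for row in data_input]
--     total = 0
--     while True:
--         batch = [(r, c)
--                  for r in range(len(grid)) for c in range(w)
--                  if grid[r][c] == "@" and neighbour_count(grid, w, r, c) < 4]
--         if not batch: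
--             return total
--         total += len(batch)
--         for r, c in batch:
--             grid[r][c] = "."
--
-- def neighbour_count(grid, w, r, c):
--     n = 0
--     for dr, dc in DIRECTIONS:
--         nr, nc = r + dr, c + dc
--         if 0 <= nr < len(grid) and 0 <= nc < w and grid[nr][nc] == "@":
--             n += 1
--     return n
-- ===== Notes on version B (the rewrite author's own statement) =====
-- stated objective: simpler
-- what changed: Replaces A's deque worklist (do_removals popping cells, re-checking the eight neighbours of each removed cell and appending newly eligible ones after a linear not-in-queue scan) by repeated full-grid passes that collect every currently eligible box, remove the whole batch at once and stop when a pass finds none; the two reach the same fixpoint because eligibility is monotone under removals.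
import Mathlib
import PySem

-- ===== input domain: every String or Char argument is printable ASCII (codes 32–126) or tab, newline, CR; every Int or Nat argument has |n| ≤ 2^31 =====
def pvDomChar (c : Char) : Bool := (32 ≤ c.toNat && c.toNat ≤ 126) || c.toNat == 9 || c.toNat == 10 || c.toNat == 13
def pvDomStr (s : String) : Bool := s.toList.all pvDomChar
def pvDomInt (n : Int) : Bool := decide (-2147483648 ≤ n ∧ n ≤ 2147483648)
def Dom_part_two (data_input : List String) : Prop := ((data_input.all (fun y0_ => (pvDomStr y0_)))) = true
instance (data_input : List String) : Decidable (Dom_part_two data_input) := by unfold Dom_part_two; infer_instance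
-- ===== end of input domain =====

-- B replaces A's deque-based worklist erosion (do_removals) by repeated full-grid passes that
-- remove every currently eligible box at once; same return value, no caller-visible side effects.

-- ===== PORT A =====

-- the 8 neighbour directions (module constant DIRECTIONS)
def pvDirs : List (Int × Int) := [(-1, -1), (-1, 0), (-1, 1), (0, -1), (0, 1), (1, -1), (1, 0), (1, 1)]

-- grid[r][c] for 0 ≤ r < len(grid), 0 ≤ c < len(grid[r]); every use in both ports is guarded
-- by those bounds, where getD with toNat is exact Python indexing
def pvGat (g : List (List Char)) (r c : Int) : Char := (g.getD r.toNat []).getD c.toNat ' '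

-- Python index used for assignment: negative indices wrap (grid[cr][cc] = ".")
def pvWrap (n : Int) (len : Nat) : Nat := (if n < 0 then n + len else n).toNat

-- grid[r][c] = "." (in-place assignment; out-of-range would raise in Python but is unreachable:
-- both ports only erase coordinates produced by bounds-checked scans)
def pvSetCell (g : List (List Char)) (r c : Int) : List (List Char) :=
  let ri := pvWrap r g.length
  let row := g.getD ri []
  g.set ri (row.set (pvWrap c row.length) '.')

-- check_neighbours' loop over DIRECTIONS with the early `return count` once count > 3
def pvCnAux (g : List (List Char)) (r c : Int) : List (Int × Int) → Int → Int
  | [], count => count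
  | d :: ds, count =>
    let nr := r + d.1
    let nc := c + d.2
    if decide (0 ≤ nr) && decide (nr < (g.length : Int)) && decide (0 ≤ nc)
        && decide (nc < ((g.headD []).length : Int)) then
      if pvGat g nr nc == '@' then
        if count + 1 > 3 then count + 1 else pvCnAux g r c ds (count + 1)
      else pvCnAux g r c ds count
    else pvCnAux g r c ds count

def pvCheckNeighbours (g : List (List Char)) (r c : Int) : Int := pvCnAux g r c pvDirs 0

-- body of the `for dr, dc in DIRECTIONS` appending loop inside do_removals
def pvAppendStep (g : List (List Char)) (c : Int × Int) (acc : List (Int × Int)) (d : Int × Int) :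
    List (Int × Int) :=
  let nr := c.1 + d.1
  let nc := c.2 + d.2
  if (decide (0 ≤ nr) && decide (nr < (g.length : Int)) && decide (0 ≤ nc)
      && decide (nc < ((g.headD []).length : Int)))
     && (pvGat g nr nc == '@') && decide (pvCheckNeighbours g nr nc < 4)
     && !(decide ((nr, nc) ∈ acc)) then acc ++ [(nr, nc)] else acc

-- termination measure for do_removals: boxes not in the queue, plus the queue length
def pvAllPos (g : List (List Char)) : List (Int × Int) :=
  (List.range g.length).flatMap (fun (r : Nat) =>
    (List.range (g.headD []).length).map (fun (c : Nat) => ((r : Int), (c : Int))))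

def pvMu1 (g : List (List Char)) (q : List (Int × Int)) : Nat :=
  (pvAllPos g).countP (fun p => (pvGat g p.1 p.2 == '@') && !(decide (p ∈ q)))

def pvMu (g : List (List Char)) (q : List (Int × Int)) : Nat := pvMu1 g q + q.length

-- ===== proof layer scratch =====
theorem pvGetD_set {α : Type} (l : List α) (i j : Nat) (a : α) (d : α) :
    (l.set i a).getD j d = if i = j ∧ j < l.length then a else l.getD j d := by
  by_cases hij : i = j
  · subst hij
    by_cases hlt : i < l.length
    · simp [List.getD, List.getElem?_set_self, hlt]
    · simp [List.getD, hlt, List.set_eq_of_length_le (Nat.le_of_not_lt hlt)]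
  · simp [List.getD, List.getElem?_set_ne hij, hij]

theorem pvGat_setCell (g : List (List Char)) (a b r c : Int) :
    pvGat (pvSetCell g a b) r c =
      if pvWrap a g.length = r.toNat ∧ r.toNat < g.length ∧
         pvWrap b (g.getD (pvWrap a g.length) []).length = c.toNat ∧
         c.toNat < (g.getD (pvWrap a g.length) []).length then '.'
      else pvGat g r c := by
  unfold pvGat pvSetCell
  rw [pvGetD_set]
  by_cases h1 : pvWrap a g.length = r.toNat ∧ r.toNat < g.length
  · obtain ⟨h11, h12⟩ := h1
    rw [if_pos ⟨h11, h12⟩, pvGetD_set]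
    rw [h11]
    by_cases h2 : pvWrap b (g.getD r.toNat []).length = c.toNat ∧ c.toNat < (g.getD r.toNat []).length
    · rw [if_pos h2, if_pos ⟨rfl, h12, h2.1, h2.2⟩]
    · rw [if_neg h2]
      rw [if_neg (by tauto)]
  · rw [if_neg h1, if_neg (by tauto)]

-- erasing two distinct in-range cells commutes
theorem pvSetCell_def (g : List (List Char)) (a b : Int) :
    pvSetCell g a b =
      g.set (pvWrap a g.length)
        ((g.getD (pvWrap a g.length) []).set
          (pvWrap b (g.getD (pvWrap a g.length) []).length) '.') := rfl

-- lengths and head are preserved by pvSetCell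
theorem pvSetCell_length (g : List (List Char)) (a b : Int) :
    (pvSetCell g a b).length = g.length := by
  unfold pvSetCell; simp

theorem pvSetCell_headD_length (g : List (List Char)) (a b : Int) :
    ((pvSetCell g a b).headD []).length = (g.headD []).length := by
  unfold pvSetCell
  cases g with
  | nil => simp
  | cons x xs =>
    cases h : pvWrap a (x :: xs).length with
    | zero => simp [h]
    | succ k => simp [h]

-- key facts about erasing a box cell
theorem pvWrap_nonneg {n : Int} (hn : 0 ≤ n) (len : Nat) : pvWrap n len = n.toNat := by
  unfold pvWrap
  rw [if_neg (by omega)]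

-- a '@' never appears by erasing
theorem pvGat_setCell_mono {g : List (List Char)} {a b r c : Int}
    (h : pvGat (pvSetCell g a b) r c = '@') : pvGat g r c = '@' := by
  rw [pvGat_setCell] at h
  split at h
  · exact absurd h (by decide)
  · exact h

-- row-major scans as one canonical list
def pvScan (n m : Nat) (Q : Nat → Nat → Bool) : List (Int × Int) :=
  (List.range n).flatMap (fun r => ((List.range m).filter (Q r)).map (fun (c : Nat) => ((r : Int), (c : Int))))

theorem pvFilterMap_if {α β : Type} (l : List α) (Q : α → Bool) (f : α → β) :
    l.filterMap (fun c => if Q c then some (f c) else none) = (l.filter Q).map f := by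
  induction l with
  | nil => rfl
  | cons x t ih =>
    by_cases h : Q x
    · simp [List.filterMap_cons, List.filter_cons, h, ih]
    · simp [List.filterMap_cons, List.filter_cons, h, ih]

theorem pvScan_mem (n m : Nat) (Q : Nat → Nat → Bool) (p : Int × Int) :
    p ∈ pvScan n m Q ↔ 0 ≤ p.1 ∧ p.1 < (n : Int) ∧ 0 ≤ p.2 ∧ p.2 < (m : Int) ∧
      Q p.1.toNat p.2.toNat = true := by
  unfold pvScan
  rw [List.mem_flatMap]
  constructor
  · rintro ⟨r, hr, hp⟩
    rw [List.mem_map] at hp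
    obtain ⟨c, hc, rfl⟩ := hp
    rw [List.mem_filter, List.mem_range] at hc
    rw [List.mem_range] at hr
    refine ⟨by positivity, by simpa using hr, by positivity, by simpa using hc.1, ?_⟩
    simpa using hc.2
  · rintro ⟨h1, h2, h3, h4, hQ⟩
    refine ⟨p.1.toNat, by rw [List.mem_range]; omega, ?_⟩
    rw [List.mem_map]
    refine ⟨p.2.toNat, ?_, ?_⟩
    · rw [List.mem_filter, List.mem_range]
      exact ⟨by omega, hQ⟩
    · rw [Int.toNat_of_nonneg h1, Int.toNat_of_nonneg h3]

theorem pvScan_nodup (n m : Nat) (Q : Nat → Nat → Bool) : (pvScan n m Q).Nodup := by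
  unfold pvScan
  rw [List.nodup_flatMap]
  constructor
  · intro r _
    apply List.Nodup.map
    · intro a b hab
      have := congrArg Prod.snd hab
      simpa using this
    · exact (List.nodup_range).filter _
  · apply List.Pairwise.imp ?_ (List.pairwise_lt_range (n := n))
    intro a b hab x hx1 hx2
    rw [List.mem_map] at hx1 hx2
    obtain ⟨c1, _, rfl⟩ := hx1
    obtain ⟨c2, _, h⟩ := hx2
    have := congrArg Prod.fst h
    simp at this
    omega

-- the erased cell itself is never a box afterwards
theorem pvGat_setCell_self_ne (g : List (List Char)) {a b : Int} (ha : 0 ≤ a) (hb : 0 ≤ b) :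
    pvGat (pvSetCell g a b) a b ≠ '@' := by
  rw [pvGat_setCell]
  split
  · decide
  · next hcond =>
    rw [pvWrap_nonneg ha, pvWrap_nonneg hb] at hcond
    intro h
    apply hcond
    unfold pvGat at h
    have h1 : a.toNat < g.length := by
      by_contra hx
      rw [List.getD_eq_default _ _ (Nat.le_of_not_lt hx)] at h
      simp [List.getD] at h
    have h2 : b.toNat < (g.getD a.toNat []).length := by
      by_contra hx
      rw [List.getD_eq_default _ _ (Nat.le_of_not_lt hx)] at h
      exact absurd h (by decide)
    exact ⟨rfl, h1, rfl, h2⟩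

theorem pvAllPos_eq_scan (g : List (List Char)) :
    pvAllPos g = pvScan g.length (g.headD []).length (fun _ _ => true) := by
  unfold pvAllPos pvScan
  simp

theorem pvAllPos_mem (g : List (List Char)) (p : Int × Int) :
    p ∈ pvAllPos g ↔ 0 ≤ p.1 ∧ p.1 < (g.length : Int) ∧ 0 ≤ p.2 ∧
      p.2 < ((g.headD []).length : Int) := by
  rw [pvAllPos_eq_scan, pvScan_mem]
  simp

theorem pvAllPos_nodup (g : List (List Char)) : (pvAllPos g).Nodup := by
  rw [pvAllPos_eq_scan]; exact pvScan_nodup _ _ _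

theorem pvAllPos_setCell (g : List (List Char)) (a b : Int) :
    pvAllPos (pvSetCell g a b) = pvAllPos g := by
  unfold pvAllPos
  rw [pvSetCell_length, pvSetCell_headD_length]

-- popping the head and erasing it does not increase the measure core
theorem pvMu1_pop_le (g : List (List Char)) (c : Int × Int) (qt : List (Int × Int)) :
    pvMu1 (pvSetCell g c.1 c.2) qt ≤ pvMu1 g (c :: qt) := by
  unfold pvMu1
  rw [pvAllPos_setCell]
  apply List.countP_mono_left
  intro p hp hpred
  simp only [Bool.and_eq_true, beq_iff_eq, Bool.not_eq_eq_eq_not, Bool.not_true,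
    decide_eq_false_iff_not] at hpred ⊢
  obtain ⟨h1, h2⟩ := hpred
  by_cases hpc : p = c
  · subst hpc
    rw [pvAllPos_mem] at hp
    exact absurd h1 (pvGat_setCell_self_ne g hp.1 hp.2.2.1)
  · refine ⟨pvGat_setCell_mono h1, ?_⟩
    simp [List.mem_cons, hpc, h2]

-- appending a fresh box position trades one measure-core unit for one queue slot
theorem pvCountP_snoc_mem {l : List (Int × Int)} (hn : l.Nodup) {p : Int × Int} (hp : p ∈ l)
    (f : Int × Int → Bool) (hf : f p = true) (acc : List (Int × Int)) (hpacc : p ∉ acc) :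
    l.countP (fun x => f x && !decide (x ∈ acc ++ [p])) + 1 =
      l.countP (fun x => f x && !decide (x ∈ acc)) := by
  induction l with
  | nil => cases hp
  | cons y t ih =>
    rw [List.countP_cons, List.countP_cons]
    by_cases hyp : y = p
    · subst hyp
      have hyt : y ∉ t := (List.nodup_cons.mp hn).1
      have hcongr : t.countP (fun x => f x && !decide (x ∈ acc ++ [y])) =
          t.countP (fun x => f x && !decide (x ∈ acc)) := by
        apply List.countP_congr
        intro x hx
        have hxy : x ≠ y := fun h => hyt (h ▸ hx)
        simp [List.mem_append, hxy]
      rw [hcongr]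
      simp [hf, hpacc]
    · have hpt : p ∈ t := by
        rcases List.mem_cons.mp hp with h | h
        · exact absurd h.symm hyp
        · exact h
      have := ih (List.nodup_cons.mp hn).2 hpt
      have hymem : (y ∈ acc ++ [p]) ↔ (y ∈ acc) := by simp [List.mem_append, hyp]
      by_cases hacc : y ∈ acc
      · have : (decide (y ∈ acc ++ [p])) = true := by simp [List.mem_append, hacc]
        simp only [this, decide_eq_true hacc]
        omega
      · have h1 : (decide (y ∈ acc ++ [p])) = false := by
          simp [List.mem_append, hacc, hyp]
        have h2 : (decide (y ∈ acc)) = false := by simp [hacc]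
        simp only [h1, h2]
        omega

theorem pvMu_fold_le (g' : List (List Char)) (c : Int × Int) (ds : List (Int × Int)) :
    ∀ acc : List (Int × Int),
      pvMu1 g' (List.foldl (pvAppendStep g' c) acc ds) +
          (List.foldl (pvAppendStep g' c) acc ds).length ≤ pvMu1 g' acc + acc.length := by
  induction ds with
  | nil => intro acc; simp
  | cons d ds ih =>
    intro acc
    rw [List.foldl_cons]
    refine le_trans (ih _) ?_
    unfold pvAppendStep
    dsimp only
    split
    · next hcond =>
      simp only [Bool.and_eq_true, decide_eq_true_eq, beq_iff_eq, Bool.not_eq_eq_eq_not,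
        Bool.not_true, decide_eq_false_iff_not] at hcond
      obtain ⟨⟨⟨⟨⟨⟨h1, h2⟩, h3⟩, h4⟩, hat⟩, _⟩, hnotin⟩ := hcond
      have hmem : (c.1 + d.1, c.2 + d.2) ∈ pvAllPos g' := by
        rw [pvAllPos_mem]
        exact ⟨h1, h2, h3, h4⟩
      have := pvCountP_snoc_mem (pvAllPos_nodup g') hmem
        (fun x => pvGat g' x.1 x.2 == '@') (by simpa using hat) acc hnotin
      beta_reduce at this
      unfold pvMu1
      rw [List.length_append]
      simp only [List.length_cons, List.length_nil]
      omega
    · exact le_refl _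

theorem pvMu_decreases (g : List (List Char)) (c : Int × Int) (qt : List (Int × Int)) :
    pvMu (pvSetCell g c.1 c.2) (pvDirs.foldl (pvAppendStep (pvSetCell g c.1 c.2) c) qt) <
      pvMu g (c :: qt) := by
  unfold pvMu
  have h1 := pvMu_fold_le (pvSetCell g c.1 c.2) c pvDirs qt
  have h2 := pvMu1_pop_le g c qt
  simp only [List.length_cons]
  omega


-- do_removals: repeatedly pop the queue head, erase it, and append newly eligible neighbours
def pvDoRemovals (g : List (List Char)) (q : List (Int × Int)) (removed : Int) : Int :=
  match q with
  | [] => removed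
  | c :: qt =>
    let g' := pvSetCell g c.1 c.2
    pvDoRemovals g' (pvDirs.foldl (pvAppendStep g' c) qt) (removed + 1)
termination_by pvMu g q
decreasing_by exact pvMu_decreases g c qt

def part_two (data_input : List String) : Int :=
  let grid := data_input.map (fun s => s.toList)
  let queue := (List.range grid.length).foldl (fun q (cr : Nat) =>
      (List.range (grid.headD []).length).foldl (fun q (cc : Nat) =>
        if (pvGat grid (cr : Int) (cc : Int) == '@')
            && decide (pvCheckNeighbours grid (cr : Int) (cc : Int) < 4) then
          q ++ [((cr : Int), (cc : Int))]
        else q) q) []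
  pvDoRemovals grid queue 0

-- ===== PORT B =====

-- neighbour_count(grid, w, r, c): plain count, no early exit
def pvNbrCount (g : List (List Char)) (w : Nat) (r c : Int) : Int :=
  pvDirs.foldl (fun n d =>
    let nr := r + d.1
    let nc := c + d.2
    if (decide (0 ≤ nr) && decide (nr < (g.length : Int)) && decide (0 ≤ nc)
        && decide (nc < (w : Int))) && (pvGat g nr nc == '@') then n + 1 else n) 0

-- the batch comprehension: all currently eligible cells, row-major
def pvBatch (g : List (List Char)) (w : Nat) : List (Int × Int) :=
  (List.range g.length).flatMap (fun (r : Nat) =>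
    (List.range w).filterMap (fun (c : Nat) =>
      if (pvGat g (r : Int) (c : Int) == '@') && decide (pvNbrCount g w (r : Int) (c : Int) < 4) then
        some ((r : Int), (c : Int))
      else none))

-- termination measure for the while loop: number of '@' characters in the grid
def pvBoxTotal (g : List (List Char)) : Nat := (g.map (fun row => row.count '@')).sum

-- counting '@': erasing never increases it, erasing an '@' strictly decreases it
theorem pvCount_set_le (l : List Char) (i : Nat) : (l.set i '.').count '@' ≤ l.count '@' := by
  induction l generalizing i with
  | nil => simp
  | cons x xs ih =>
    cases i with
    | zero =>
      simp only [List.set_cons_zero, List.count_cons, beq_iff_eq]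
      split <;> split <;> simp_all
    | succ k =>
      simp only [List.set_cons_succ, List.count_cons]
      have := ih k
      split <;> omega

theorem pvCount_set_lt (l : List Char) (i : Nat) (h : l.getD i ' ' = '@') :
    (l.set i '.').count '@' < l.count '@' := by
  induction l generalizing i with
  | nil => simp [List.getD] at h
  | cons x xs ih =>
    cases i with
    | zero =>
      simp only [List.getD, List.getElem?_cons_zero, Option.getD_some] at h
      subst h
      simp only [List.set_cons_zero, List.count_cons]
      simp
    | succ k =>
      simp only [List.getD, List.getElem?_cons_succ] at h
      simp only [List.set_cons_succ, List.count_cons]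
      have := ih k h
      split <;> omega

theorem pvSum_set_le (l : List Nat) (i : Nat) (a : Nat) (h : a ≤ l.getD i 0) :
    (l.set i a).sum ≤ l.sum := by
  induction l generalizing i with
  | nil => simp
  | cons x xs ih =>
    cases i with
    | zero =>
      simp only [List.getD, List.getElem?_cons_zero, Option.getD_some] at h
      simp only [List.set_cons_zero, List.sum_cons]
      omega
    | succ k =>
      simp only [List.getD, List.getElem?_cons_succ] at h
      simp only [List.set_cons_succ, List.sum_cons]
      have := ih k h
      omega

theorem pvSum_set_lt (l : List Nat) (i : Nat) (a : Nat) (hi : i < l.length)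
    (h : a < l.getD i 0) : (l.set i a).sum < l.sum := by
  induction l generalizing i with
  | nil => simp at hi
  | cons x xs ih =>
    cases i with
    | zero =>
      simp only [List.getD, List.getElem?_cons_zero, Option.getD_some] at h
      simp only [List.set_cons_zero, List.sum_cons]
      omega
    | succ k =>
      simp only [List.getD, List.getElem?_cons_succ] at h
      simp only [List.set_cons_succ, List.sum_cons]
      have := ih k (by simpa using hi) h
      omega

theorem pvBoxTotal_setCell_le (g : List (List Char)) (a b : Int) :
    pvBoxTotal (pvSetCell g a b) ≤ pvBoxTotal g := by
  rw [pvSetCell_def]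
  unfold pvBoxTotal
  rw [List.map_set]
  apply pvSum_set_le
  by_cases hi : pvWrap a g.length < g.length
  · rw [List.getD_eq_getElem _ _ (show pvWrap a g.length < (List.map (fun row => row.count '@') g).length by simpa using hi), List.getElem_map]
    rw [List.getD_eq_getElem _ _ hi]
    exact pvCount_set_le _ _
  · rw [List.getD_eq_default _ _ (by simpa using Nat.le_of_not_lt hi)]
    exact Nat.zero_le _

theorem pvBoxTotal_setCell_lt (g : List (List Char)) (a b : Int) (ha : 0 ≤ a) (hb : 0 ≤ b)
    (h : pvGat g a b = '@') : pvBoxTotal (pvSetCell g a b) < pvBoxTotal g := by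
  have hi : a.toNat < g.length := by
    by_contra hi
    unfold pvGat at h
    rw [List.getD_eq_default _ _ (Nat.le_of_not_lt hi)] at h
    simp [List.getD] at h
  have hj : b.toNat < (g.getD a.toNat []).length := by
    by_contra hj
    unfold pvGat at h
    rw [List.getD_eq_default _ _ (Nat.le_of_not_lt hj)] at h
    exact absurd h (by decide)
  rw [pvSetCell_def]
  unfold pvBoxTotal
  rw [List.map_set, pvWrap_nonneg ha]
  apply pvSum_set_lt _ _ _ (by simpa using hi)
  rw [List.getD_eq_getElem _ _ (show a.toNat < (List.map (fun row => row.count '@') g).length by simpa using hi), List.getElem_map,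
      ← List.getD_eq_getElem g [] hi]
  rw [pvWrap_nonneg hb]
  apply pvCount_set_lt
  exact h

theorem pvBoxTotal_foldSet_le (l : List (Int × Int)) (g : List (List Char)) :
    pvBoxTotal (l.foldl (fun g2 p => pvSetCell g2 p.1 p.2) g) ≤ pvBoxTotal g := by
  induction l generalizing g with
  | nil => simp
  | cons p t ih => exact le_trans (ih _) (pvBoxTotal_setCell_le g p.1 p.2)

theorem pvBatch_eq_scan (g : List (List Char)) (w : Nat) :
    pvBatch g w = pvScan g.length w
      (fun r c => (pvGat g (r : Int) (c : Int) == '@') && decide (pvNbrCount g w (r : Int) (c : Int) < 4)) := by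
  have h : ∀ r : Nat, (List.range w).filterMap
      (fun (c : Nat) => if (pvGat g (r : Int) (c : Int) == '@') && decide (pvNbrCount g w (r : Int) (c : Int) < 4) then
        some ((r : Int), (c : Int)) else none) =
      ((List.range w).filter
        (fun (c : Nat) => (pvGat g (r : Int) (c : Int) == '@') && decide (pvNbrCount g w (r : Int) (c : Int) < 4))).map
        (fun (c : Nat) => ((r : Int), (c : Int))) := fun r => pvFilterMap_if _ _ _
  unfold pvBatch pvScan
  simp only [h]

theorem pvBoxTotal_batch_lt (g : List (List Char)) (w : Nat) (h : pvBatch g w ≠ []) :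
    pvBoxTotal ((pvBatch g w).foldl (fun g2 p => pvSetCell g2 p.1 p.2) g) < pvBoxTotal g := by
  cases hb : pvBatch g w with
  | nil => exact absurd hb h
  | cons p rest =>
    have hp : p ∈ pvBatch g w := hb ▸ List.mem_cons_self
    rw [pvBatch_eq_scan, pvScan_mem] at hp
    obtain ⟨h1, _, h3, _, hQ⟩ := hp
    simp only [Bool.and_eq_true, beq_iff_eq] at hQ
    rw [Int.toNat_of_nonneg h1, Int.toNat_of_nonneg h3] at hQ
    rw [List.foldl_cons]
    exact lt_of_le_of_lt (pvBoxTotal_foldSet_le rest _)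
      (pvBoxTotal_setCell_lt g p.1 p.2 h1 h3 hQ.1)


def pvBLoop (g : List (List Char)) (w : Nat) (total : Int) : Int :=
  let batch := pvBatch g w
  if hb : batch = [] then total
  else pvBLoop (batch.foldl (fun g2 p => pvSetCell g2 p.1 p.2) g) w (total + batch.length)
termination_by pvBoxTotal g
decreasing_by exact pvBoxTotal_batch_lt g w hb

def part_two_alt (data_input : List String) : Int :=
  let w := if data_input ≠ [] then (data_input.headD "").length else 0
  pvBLoop (data_input.map (fun s => s.toList)) w 0

-- ===== PRECONDITION & SPEC =====
-- Pre_ excludes ragged inputs in which some row is shorter than the first row: there A raises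
-- IndexError while scanning (and B raises the same way); on every other input A returns.
def Pre_part_two (data_input : List String) : Prop :=
  ∀ s ∈ data_input, (data_input.headD "").length ≤ s.length
instance (data_input : List String) : Decidable (Pre_part_two data_input) := by
  unfold Pre_part_two; infer_instance

def pvWitness_part_two : List String := ["@@.", "@@@", ".@@"]

def Spec_part_two (data_input : List String) (out : Int) : Prop := out = part_two_alt data_input
instance (data_input : List String) (out : Int) : Decidable (Spec_part_two data_input out) := by
  unfold Spec_part_two; infer_instance

-- ===== CLAIM (what is proved, stated in full; the proofs are below) =====
def Claim_equal_part_two : Prop := ∀ (data_input : List String), Dom_part_two data_input →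
  Pre_part_two data_input → Spec_part_two data_input (part_two data_input)

-- ===== LEMMAS AND PROOFS =====

def pvShape (w : Nat) (g : List (List Char)) : Prop :=
  (g.headD []).length = w ∧ ∀ row ∈ g, w ≤ row.length

abbrev pvBoxP (w : Nat) (g : List (List Char)) (p : Int × Int) : Prop :=
  0 ≤ p.1 ∧ p.1 < (g.length : Int) ∧ 0 ≤ p.2 ∧ p.2 < (w : Int) ∧ pvGat g p.1 p.2 = '@'

def pvCnt (w : Nat) (g : List (List Char)) (p : Int × Int) : Nat :=
  pvDirs.countP (fun d => decide (pvBoxP w g (p.1 + d.1, p.2 + d.2)))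

def pvEligP (w : Nat) (g : List (List Char)) (p : Int × Int) : Prop :=
  pvBoxP w g p ∧ pvCnt w g p < 4

theorem pvShape_setCell {w : Nat} {g : List (List Char)} (hs : pvShape w g) (a b : Int) :
    pvShape w (pvSetCell g a b) := by
  obtain ⟨h1, h2⟩ := hs
  refine ⟨by rw [pvSetCell_headD_length]; exact h1, ?_⟩
  intro row hrow
  unfold pvSetCell at hrow
  by_cases hlt : pvWrap a g.length < g.length
  · rcases List.mem_or_eq_of_mem_set hrow with h | h
    · exact h2 row h
    · subst h
      rw [List.length_set]
      rw [List.getD_eq_getElem _ _ hlt]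
      exact h2 _ (List.getElem_mem hlt)
  · rw [List.set_eq_of_length_le (Nat.le_of_not_lt hlt)] at hrow
    exact h2 _ hrow

theorem pvBoxP_rowlen {w : Nat} {g : List (List Char)} (hs : pvShape w g) {q : Int × Int}
    (hq : pvBoxP w g q) : q.2.toNat < (g.getD q.1.toNat []).length := by
  obtain ⟨hq1, hq2, hq3, hq4, _⟩ := hq
  have hlt : q.1.toNat < g.length := by omega
  have : w ≤ (g.getD q.1.toNat []).length := by
    rw [List.getD_eq_getElem _ _ hlt]
    exact hs.2 _ (List.getElem_mem hlt)
  omega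

theorem pvGat_erase_self {w : Nat} {g : List (List Char)} (hs : pvShape w g) {q : Int × Int}
    (hq : pvBoxP w g q) : pvGat (pvSetCell g q.1 q.2) q.1 q.2 = '.' := by
  obtain ⟨hq1, hq2, hq3, hq4, _⟩ := id hq
  rw [pvGat_setCell]
  rw [if_pos ?_]
  rw [pvWrap_nonneg hq1, pvWrap_nonneg hq3]
  exact ⟨rfl, by omega, rfl, pvBoxP_rowlen hs hq⟩

theorem pvGat_erase_ne {g : List (List Char)} {q : Int × Int} (hq1 : 0 ≤ q.1) (hq3 : 0 ≤ q.2)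
    {r c : Int} (hr : 0 ≤ r) (hc : 0 ≤ c) (hne : (r, c) ≠ q) :
    pvGat (pvSetCell g q.1 q.2) r c = pvGat g r c := by
  rw [pvGat_setCell]
  rw [if_neg ?_]
  rintro ⟨h1, h2, h3, h4⟩
  rw [pvWrap_nonneg hq1] at h1
  rw [pvWrap_nonneg hq3] at h3
  apply hne
  have : r = q.1 := by omega
  have : c = q.2 := by omega
  simp_all [Prod.ext_iff]

-- C1: boxes after erasing q are exactly the boxes other than q
theorem pvBoxP_setCell {w : Nat} {g : List (List Char)} (hs : pvShape w g) {q : Int × Int}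
    (hq : pvBoxP w g q) (p : Int × Int) :
    pvBoxP w (pvSetCell g q.1 q.2) p ↔ pvBoxP w g p ∧ p ≠ q := by
  constructor
  · rintro ⟨h1, h2, h3, h4, h5⟩
    rw [pvSetCell_length] at h2
    have hne : p ≠ q := by
      rintro rfl
      rw [pvGat_erase_self hs hq] at h5
      exact absurd h5 (by decide)
    refine ⟨⟨h1, h2, h3, h4, ?_⟩, hne⟩
    rw [← pvGat_erase_ne hq.1 hq.2.2.1 h1 h3 (by simpa using hne)]
    exact h5
  · rintro ⟨⟨h1, h2, h3, h4, h5⟩, hne⟩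
    refine ⟨h1, by rwa [pvSetCell_length], h3, h4, ?_⟩
    rw [pvGat_erase_ne hq.1 hq.2.2.1 h1 h3 (by simpa using hne)]
    exact h5

theorem pvCnt_setCell_le {w : Nat} {g : List (List Char)} (hs : pvShape w g) {q : Int × Int}
    (hq : pvBoxP w g q) (p : Int × Int) :
    pvCnt w (pvSetCell g q.1 q.2) p ≤ pvCnt w g p := by
  unfold pvCnt
  apply List.countP_mono_left
  intro d _
  simp only [decide_eq_true_eq]
  intro h
  exact ((pvBoxP_setCell hs hq _).mp h).1

theorem pvEligP_mono {w : Nat} {g : List (List Char)} (hs : pvShape w g) {q p : Int × Int}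
    (hq : pvBoxP w g q) (he : pvEligP w g p) (hb : pvBoxP w (pvSetCell g q.1 q.2) p) :
    pvEligP w (pvSetCell g q.1 q.2) p :=
  ⟨hb, lt_of_le_of_lt (pvCnt_setCell_le hs hq p) he.2⟩

-- a run: a sequence of removals, each eligible when it is removed
inductive pvRun (w : Nat) : List (List Char) → List (Int × Int) → List (List Char) → Prop
  | nil (g : List (List Char)) : pvRun w g [] g
  | cons {g : List (List Char)} {p : Int × Int} {l : List (Int × Int)} {g' : List (List Char)}
      (he : pvEligP w g p) (hr : pvRun w (pvSetCell g p.1 p.2) l g') : pvRun w g (p :: l) g'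

def pvFinal (w : Nat) (g : List (List Char)) : Prop := ∀ p, ¬ pvEligP w g p

theorem pvRun_shape {w : Nat} {g l g'} (hr : pvRun w g l g') (hs : pvShape w g) :
    pvShape w g' := by
  induction hr with
  | nil => exact hs
  | cons he hr ih => exact ih (pvShape_setCell hs _ _)

theorem pvRun_append {w : Nat} {g l1 g1 l2 g2} (h1 : pvRun w g l1 g1)
    (h2 : pvRun w g1 l2 g2) : pvRun w g (l1 ++ l2) g2 := by
  induction h1 with
  | nil => exact h2
  | cons he hr ih => exact pvRun.cons he (ih h2)

theorem pvEligP_preserve {w : Nat} {g m g2} (hr : pvRun w g m g2) (hs : pvShape w g)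
    {p : Int × Int} (he : pvEligP w g p) (hp : p ∉ m) : pvEligP w g2 p := by
  induction hr with
  | nil => exact he
  | @cons g q l g' hq hrun ih =>
    have hpq : p ≠ q := by rintro rfl; exact hp List.mem_cons_self
    have hb : pvBoxP w (pvSetCell g q.1 q.2) p :=
      (pvBoxP_setCell hs hq.1 p).mpr ⟨he.1, hpq⟩
    exact ih (pvShape_setCell hs _ _) (pvEligP_mono hs hq.1 he hb)
      (fun h => hp (List.mem_cons_of_mem _ h))

theorem pvSetCell_comm {w : Nat} {g : List (List Char)} (hs : pvShape w g) {p q : Int × Int}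
    (hp : pvBoxP w g p) (hq : pvBoxP w g q) (hne : p ≠ q) :
    pvSetCell (pvSetCell g p.1 p.2) q.1 q.2 = pvSetCell (pvSetCell g q.1 q.2) p.1 p.2 := by
  have hpr : p.1.toNat < g.length := by have := hp.2.1; have := hp.1; omega
  have hqr : q.1.toNat < g.length := by have := hq.2.1; have := hq.1; omega
  have hpc := pvBoxP_rowlen hs hp
  have hqc := pvBoxP_rowlen hs hq
  rw [pvSetCell_def (pvSetCell g p.1 p.2), pvSetCell_def (pvSetCell g q.1 q.2),
      pvSetCell_def g p.1 p.2, pvSetCell_def g q.1 q.2]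
  rw [List.length_set, List.length_set]
  rw [pvWrap_nonneg hp.1 g.length, pvWrap_nonneg hq.1 g.length] at *
  by_cases hrr : p.1.toNat = q.1.toNat
  · -- same row, different column
    have hcc : p.2.toNat ≠ q.2.toNat := by
      intro h
      apply hne
      have h1 : p.1 = q.1 := by have := hp.1; have := hq.1; omega
      have h2 : p.2 = q.2 := by have := hp.2.2.1; have := hq.2.2.1; omega
      exact Prod.ext h1 h2
    rw [← hrr] at *
    rw [pvGetD_set, if_pos ⟨rfl, hpr⟩, pvGetD_set, if_pos ⟨rfl, hpr⟩]
    rw [List.set_set, List.set_set, List.length_set, List.length_set]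
    rw [pvWrap_nonneg hq.2.2.1, pvWrap_nonneg hp.2.2.1]
    rw [List.set_comm _ _ hcc]
  · -- different rows
    rw [pvGetD_set, if_neg (by tauto), pvGetD_set, if_neg (by tauto)]
    rw [pvWrap_nonneg hq.2.2.1, pvWrap_nonneg hp.2.2.1]
    rw [List.set_comm _ _ hrr]

theorem pvRun_reorder {w : Nat} {g m g2} (hr : pvRun w g m g2) (hs : pvShape w g)
    {p : Int × Int} (hm : p ∈ m) (he : pvEligP w g p) :
    pvRun w (pvSetCell g p.1 p.2) (m.erase p) g2 := by
  induction hr with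
  | nil => cases hm
  | @cons g q l g' hq hrun ih =>
    by_cases hpq : p = q
    · subst hpq
      rwa [List.erase_cons_head]
    · have hpl : p ∈ l := by
        rcases List.mem_cons.mp hm with h | h
        · exact absurd h hpq
        · exact h
      rw [List.erase_cons_tail (by simp [Ne.symm hpq])]
      have hsq : pvShape w (pvSetCell g q.1 q.2) := pvShape_setCell hs _ _
      have heq : pvEligP w (pvSetCell g q.1 q.2) p :=
        pvEligP_mono hs hq.1 he ((pvBoxP_setCell hs hq.1 p).mpr ⟨he.1, hpq⟩)
      have hqe : pvEligP w (pvSetCell g p.1 p.2) q :=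
        pvEligP_mono hs he.1 hq ((pvBoxP_setCell hs he.1 q).mpr ⟨hq.1, Ne.symm hpq⟩)
      have := ih hsq hpl heq
      rw [← pvSetCell_comm hs he.1 hq.1 hpq] at this
      exact pvRun.cons hqe this

theorem pvRun_length_le {w : Nat} {g l g1} (h1 : pvRun w g l g1) :
    ∀ {m g2}, pvRun w g m g2 → pvShape w g → pvFinal w g2 → l.length ≤ m.length := by
  induction h1 with
  | nil => intro m g2 _ _ _; exact Nat.zero_le _
  | @cons g p l' g1' he hrun ih =>
    intro m g2 h2 hs hf
    have hpm : p ∈ m := by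
      by_contra hpm
      exact hf p (pvEligP_preserve h2 hs he hpm)
    have h2' := pvRun_reorder h2 hs hpm he
    have hle := ih h2' (pvShape_setCell hs _ _) hf
    have hlen := List.length_erase_of_mem hpm
    have hml : 1 ≤ m.length := List.length_pos_of_mem hpm
    simp only [List.length_cons]
    have : l'.length ≤ (m.erase p).length := hle
    omega

-- check_neighbours with early exit computes min(count, 4)
theorem pvCnAux_spec {w : Nat} {g : List (List Char)} (hs : pvShape w g) (r c : Int) :
    ∀ (ds : List (Int × Int)) (count : Int), 0 ≤ count → count ≤ 3 →
      pvCnAux g r c ds count =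
        min (count + (ds.countP (fun d => decide (pvBoxP w g (r + d.1, c + d.2))) : Int)) 4 := by
  intro ds
  induction ds with
  | nil => intro count h0 h3; simp [pvCnAux]; omega
  | cons d ds ih =>
    intro count h0 h3
    rw [List.countP_cons]
    unfold pvCnAux
    dsimp only
    have hb : (decide (0 ≤ r + d.1) && decide (r + d.1 < (g.length : Int)) && decide (0 ≤ c + d.2)
        && decide (c + d.2 < ((g.headD []).length : Int))
        && (pvGat g (r + d.1) (c + d.2) == '@')) = decide (pvBoxP w g (r + d.1, c + d.2)) := by
      rw [hs.1]
      by_cases hbx : pvBoxP w g (r + d.1, c + d.2)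
      · obtain ⟨x1, x2, x3, x4, x5⟩ := hbx
        simp_all [pvBoxP]
      · simp only [decide_eq_false hbx]
        by_contra hx
        simp only [Bool.and_eq_true, decide_eq_true_eq, beq_iff_eq, Bool.not_eq_false] at hx
        exact absurd ⟨hx.1.1.1.1, hx.1.1.1.2, hx.1.1.2, hx.1.2, hx.2⟩ hbx
    by_cases hin : (decide (0 ≤ r + d.1) && decide (r + d.1 < (g.length : Int)) &&
        decide (0 ≤ c + d.2) && decide (c + d.2 < ((g.headD []).length : Int))) = true
    · rw [if_pos hin]
      by_cases hat : (pvGat g (r + d.1) (c + d.2) == '@') = true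
      · rw [if_pos hat]
        have hbx : decide (pvBoxP w g (r + d.1, c + d.2)) = true := by
          rw [← hb]; simp_all
        simp only [hbx, if_true]
        by_cases hc4 : count + 1 > 3
        · rw [if_pos hc4]
          have hnn : (ds.countP (fun d => decide (pvBoxP w g (r + d.1, c + d.2))) : Int) ≥ 0 := by
            positivity
          rw [min_def]
          split_ifs <;> omega
        · rw [if_neg hc4]
          rw [ih (count + 1) (by omega) (by omega)]
          rw [min_def, min_def]
          split_ifs <;> omega
      · rw [if_neg hat]
        have hbx : decide (pvBoxP w g (r + d.1, c + d.2)) = false := by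
          rw [← hb]; simp_all
        simp only [hbx, if_false]
        rw [ih count h0 h3]
        simp
    · rw [if_neg hin]
      have hbox : ¬ pvBoxP w g (r + d.1, c + d.2) := by
        rintro ⟨x1, x2, x3, x4, x5⟩
        apply hin
        rw [hs.1]
        simp only [Bool.and_eq_true, decide_eq_true_eq]
        exact ⟨⟨⟨x1, x2⟩, x3⟩, x4⟩
      simp only [decide_eq_false hbox]
      rw [ih count h0 h3]
      simp

theorem pvCheckNeighbours_lt4 {w : Nat} {g : List (List Char)} (hs : pvShape w g) (r c : Int) :
    (pvCheckNeighbours g r c < 4) ↔ pvCnt w g (r, c) < 4 := by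
  unfold pvCheckNeighbours pvCnt
  rw [pvCnAux_spec hs r c pvDirs 0 (by omega) (by omega)]
  dsimp only
  omega

-- B's neighbour_count is exactly the box count
theorem pvNbrCount_spec {w : Nat} {g : List (List Char)} (hs : pvShape w g) (r c : Int) :
    pvNbrCount g w r c = (pvCnt w g (r, c) : Int) := by
  unfold pvNbrCount pvCnt
  have : ∀ (ds : List (Int × Int)) (n : Int),
      ds.foldl (fun n d =>
        if (decide (0 ≤ r + d.1) && decide (r + d.1 < (g.length : Int)) && decide (0 ≤ c + d.2)
            && decide (c + d.2 < (w : Int))) && (pvGat g (r + d.1) (c + d.2) == '@') then n + 1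
        else n) n =
      n + (ds.countP (fun d => decide (pvBoxP w g (r + d.1, c + d.2))) : Int) := by
    intro ds
    induction ds with
    | nil => intro n; simp
    | cons d ds ih =>
      intro n
      rw [List.foldl_cons, List.countP_cons, ih]
      have hb : ((decide (0 ≤ r + d.1) && decide (r + d.1 < (g.length : Int)) &&
          decide (0 ≤ c + d.2) && decide (c + d.2 < (w : Int)))
          && (pvGat g (r + d.1) (c + d.2) == '@')) = decide (pvBoxP w g (r + d.1, c + d.2)) := by
        by_cases hbx : pvBoxP w g (r + d.1, c + d.2)
        · obtain ⟨x1, x2, x3, x4, x5⟩ := hbx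
          simp_all [pvBoxP]
        · simp only [decide_eq_false hbx]
          by_contra hx
          simp only [Bool.and_eq_true, decide_eq_true_eq, beq_iff_eq, Bool.not_eq_false] at hx
          exact absurd ⟨hx.1.1.1.1, hx.1.1.1.2, hx.1.1.2, hx.1.2, hx.2⟩ hbx
      rw [hb]
      by_cases hbx : decide (pvBoxP w g (r + d.1, c + d.2)) = true
      · simp only [hbx, if_true]; push_cast; omega
      · rw [Bool.not_eq_true] at hbx; simp only [hbx, if_false]; push_cast; omega
  rw [this pvDirs 0]
  dsimp only
  omega

theorem pvBatch_eligP {w : Nat} {g : List (List Char)} (hs : pvShape w g) (p : Int × Int) :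
    p ∈ pvBatch g w ↔ pvEligP w g p := by
  rw [pvBatch_eq_scan, pvScan_mem]
  constructor
  · rintro ⟨h1, h2, h3, h4, hQ⟩
    simp only [Bool.and_eq_true, beq_iff_eq, decide_eq_true_eq] at hQ
    rw [Int.toNat_of_nonneg h1, Int.toNat_of_nonneg h3] at hQ
    refine ⟨⟨h1, h2, h3, h4, hQ.1⟩, ?_⟩
    have := hQ.2
    rw [pvNbrCount_spec hs] at this
    exact_mod_cast this
  · rintro ⟨⟨h1, h2, h3, h4, h5⟩, hcnt⟩
    refine ⟨h1, h2, h3, h4, ?_⟩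
    simp only [Bool.and_eq_true, beq_iff_eq, decide_eq_true_eq]
    rw [Int.toNat_of_nonneg h1, Int.toNat_of_nonneg h3]
    refine ⟨h5, ?_⟩
    rw [pvNbrCount_spec hs]
    exact_mod_cast hcnt

theorem pvBatch_nodup (g : List (List Char)) (w : Nat) : (pvBatch g w).Nodup := by
  rw [pvBatch_eq_scan]; exact pvScan_nodup _ _ _

theorem pvRun_batch {w : Nat} : ∀ (b : List (Int × Int)) (g : List (List Char)),
    pvShape w g → b.Nodup → (∀ p ∈ b, pvEligP w g p) →
    pvRun w g b (b.foldl (fun g2 p => pvSetCell g2 p.1 p.2) g) := by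
  intro b
  induction b with
  | nil => intro g _ _ _; exact pvRun.nil g
  | cons p t ih =>
    intro g hs hn he
    rw [List.foldl_cons]
    have hep : pvEligP w g p := he p List.mem_cons_self
    refine pvRun.cons hep (ih _ (pvShape_setCell hs _ _) (List.nodup_cons.mp hn).2 ?_)
    intro q hq
    have hqe : pvEligP w g q := he q (List.mem_cons_of_mem _ hq)
    have hqp : q ≠ p := fun h => (List.nodup_cons.mp hn).1 (h ▸ hq)
    exact pvEligP_mono hs hep.1 hqe ((pvBoxP_setCell hs hep.1 q).mpr ⟨hqe.1, hqp⟩)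

theorem pvBLoop_spec {w : Nat} : ∀ (n : Nat) (g : List (List Char)), pvBoxTotal g ≤ n →
    pvShape w g → ∃ l g', pvRun w g l g' ∧ pvFinal w g' ∧
      ∀ total : Int, pvBLoop g w total = total + l.length := by
  intro n
  induction n with
  | zero =>
    intro g hn hs
    -- no '@' at all: batch is empty and the grid is final
    have hb : pvBatch g w = [] := by
      by_contra hb
      cases hbe : pvBatch g w with
      | nil => exact hb hbe
      | cons p t =>
        have hp : p ∈ pvBatch g w := hbe ▸ List.mem_cons_self
        rw [pvBatch_eligP hs] at hp
        have hlt := pvBoxTotal_setCell_lt g p.1 p.2 hp.1.1 hp.1.2.2.1 hp.1.2.2.2.2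
        omega
    refine ⟨[], g, pvRun.nil g, ?_, ?_⟩
    · intro p hp
      have : p ∈ pvBatch g w := (pvBatch_eligP hs p).mpr hp
      rw [hb] at this
      cases this
    · intro total
      rw [pvBLoop]
      simp [hb]
  | succ n ih =>
    intro g hn hs
    by_cases hb : pvBatch g w = []
    · refine ⟨[], g, pvRun.nil g, ?_, ?_⟩
      · intro p hp
        have : p ∈ pvBatch g w := (pvBatch_eligP hs p).mpr hp
        rw [hb] at this
        cases this
      · intro total
        rw [pvBLoop]
        simp [hb]
    · have hrun1 : pvRun w g (pvBatch g w)
          ((pvBatch g w).foldl (fun g2 p => pvSetCell g2 p.1 p.2) g) :=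
        pvRun_batch _ g hs (pvBatch_nodup g w) (fun p hp => (pvBatch_eligP hs p).mp hp)
      set g1 := (pvBatch g w).foldl (fun g2 p => pvSetCell g2 p.1 p.2) g with hg1
      have hs1 : pvShape w g1 := pvRun_shape hrun1 hs
      have hlt : pvBoxTotal g1 < pvBoxTotal g := pvBoxTotal_batch_lt g w hb
      obtain ⟨l2, g2, hrun2, hfin, heq⟩ := ih g1 (by omega) hs1
      refine ⟨pvBatch g w ++ l2, g2, pvRun_append hrun1 hrun2, hfin, ?_⟩
      intro total
      rw [pvBLoop]
      simp only [hb, dite_false, dif_neg]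
      rw [heq (total + (pvBatch g w).length)]
      rw [List.length_append]
      push_cast
      ring

-- the neighbour-appending fold keeps the queue invariant
theorem pvFoldAppend_props {w : Nat} {g' : List (List Char)} (hs : pvShape w g') (c : Int × Int) :
    ∀ (ds : List (Int × Int)) (acc : List (Int × Int)), acc.Nodup →
      (∀ p ∈ acc, pvEligP w g' p) →
      (ds.foldl (pvAppendStep g' c) acc).Nodup ∧
      (∀ p ∈ ds.foldl (pvAppendStep g' c) acc, pvEligP w g' p) ∧
      (∀ x ∈ acc, x ∈ ds.foldl (pvAppendStep g' c) acc) ∧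
      (∀ d ∈ ds, pvEligP w g' (c.1 + d.1, c.2 + d.2) →
        (c.1 + d.1, c.2 + d.2) ∈ ds.foldl (pvAppendStep g' c) acc) := by
  intro ds
  induction ds with
  | nil =>
    intro acc hn he
    exact ⟨hn, he, fun x hx => hx, fun d hd => absurd hd (List.not_mem_nil)⟩
  | cons d ds ih =>
    intro acc hn he
    rw [List.foldl_cons]
    have hstep : (pvAppendStep g' c acc d).Nodup ∧
        (∀ p ∈ pvAppendStep g' c acc d, pvEligP w g' p) ∧
        (∀ x ∈ acc, x ∈ pvAppendStep g' c acc d) ∧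
        (pvEligP w g' (c.1 + d.1, c.2 + d.2) → (c.1 + d.1, c.2 + d.2) ∈ pvAppendStep g' c acc d) := by
      unfold pvAppendStep
      dsimp only
      split
      · next hcond =>
        simp only [Bool.and_eq_true, decide_eq_true_eq, beq_iff_eq, Bool.not_eq_eq_eq_not,
          Bool.not_true, decide_eq_false_iff_not] at hcond
        obtain ⟨⟨⟨⟨⟨⟨h1, h2⟩, h3⟩, h4⟩, hat⟩, hcn⟩, hnotin⟩ := hcond
        have helig : pvEligP w g' (c.1 + d.1, c.2 + d.2) := by
          refine ⟨⟨h1, h2, h3, by rwa [hs.1] at h4, hat⟩, ?_⟩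
          rw [← pvCheckNeighbours_lt4 hs]
          exact hcn
        refine ⟨?_, ?_, ?_, ?_⟩
        · rw [List.nodup_append]
          refine ⟨hn, List.nodup_singleton _, ?_⟩
          intro a ha b hb
          rw [List.mem_singleton] at hb
          subst hb
          exact fun h => hnotin (h ▸ ha)
        · intro p hp
          rcases List.mem_append.mp hp with h | h
          · exact he p h
          · rw [List.mem_singleton] at h
            exact h ▸ helig
        · intro x hx
          exact List.mem_append.mpr (Or.inl hx)
        · intro _
          exact List.mem_append.mpr (Or.inr (List.mem_singleton.mpr rfl))
      · next hcond =>
        refine ⟨hn, he, fun x hx => hx, ?_⟩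
        intro helig
        by_contra
        apply hcond
        simp only [Bool.and_eq_true, decide_eq_true_eq, beq_iff_eq, Bool.not_eq_eq_eq_not,
          Bool.not_true, decide_eq_false_iff_not]
        obtain ⟨⟨x1, x2, x3, x4, x5⟩, hcnt⟩ := helig
        refine ⟨⟨⟨⟨⟨⟨x1, x2⟩, x3⟩, by rwa [hs.1]⟩, x5⟩, ?_⟩, ?_⟩
        · rw [pvCheckNeighbours_lt4 hs]
          exact hcnt
        · intro hmem
          exact absurd (he _ hmem) (by simp_all)
    obtain ⟨hn', he', hsub, hd⟩ := hstep
    obtain ⟨rn, re, rsub, rd⟩ := ih (pvAppendStep g' c acc d) hn' he'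
    refine ⟨rn, re, fun x hx => rsub _ (hsub x hx), ?_⟩
    intro e hemem helige
    rcases List.mem_cons.mp hemem with h | h
    · subst h
      exact rsub _ (hd helige)
    · exact rd e h helige

theorem pvCountP_lt_exists {α : Type} {l : List α} {p q : α → Bool}
    (h : l.countP q < l.countP p) : ∃ a ∈ l, p a = true ∧ q a = false := by
  by_contra hx
  push_neg at hx
  have : l.countP p ≤ l.countP q := by
    apply List.countP_mono_left
    intro a ha hpa
    have := hx a ha hpa
    simpa using this
  omega

theorem pvDirs_neg_mem : ∀ d ∈ pvDirs, (-d.1, -d.2) ∈ pvDirs := by decide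

theorem pvDoRemovals_spec {w : Nat} : ∀ (n : Nat) (g : List (List Char)) (q : List (Int × Int)),
    pvMu g q ≤ n → pvShape w g → q.Nodup → (∀ p ∈ q, pvEligP w g p) →
    (∀ p, pvEligP w g p → p ∈ q) →
    ∃ l g', pvRun w g l g' ∧ pvFinal w g' ∧
      ∀ removed : Int, pvDoRemovals g q removed = removed + l.length := by
  intro n
  induction n with
  | zero =>
    intro g q hmu hs hn he hcomp
    cases q with
    | nil =>
      refine ⟨[], g, pvRun.nil g, fun p hp => absurd (hcomp p hp) (List.not_mem_nil), ?_⟩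
      intro removed
      rw [pvDoRemovals]
      simp
    | cons c qt =>
      exfalso
      unfold pvMu at hmu
      simp [List.length_cons] at hmu
  | succ m ih =>
    intro g q hmu hs hn he hcomp
    cases q with
    | nil =>
      refine ⟨[], g, pvRun.nil g, fun p hp => absurd (hcomp p hp) (List.not_mem_nil), ?_⟩
      intro removed
      rw [pvDoRemovals]
      simp
    | cons c qt =>
      have hec : pvEligP w g c := he c List.mem_cons_self
      have hs' : pvShape w (pvSetCell g c.1 c.2) := pvShape_setCell hs _ _
      have hct : c ∉ qt := (List.nodup_cons.mp hn).1
      have hqt_elig : ∀ p ∈ qt, pvEligP w (pvSetCell g c.1 c.2) p := by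
        intro p hp
        have hpe := he p (List.mem_cons_of_mem _ hp)
        have hpc : p ≠ c := fun h => hct (h ▸ hp)
        exact pvEligP_mono hs hec.1 hpe ((pvBoxP_setCell hs hec.1 p).mpr ⟨hpe.1, hpc⟩)
      obtain ⟨fn, fe, fsub, fd⟩ :=
        pvFoldAppend_props hs' c pvDirs qt (List.nodup_cons.mp hn).2 hqt_elig
      have hcomp' : ∀ p, pvEligP w (pvSetCell g c.1 c.2) p →
          p ∈ pvDirs.foldl (pvAppendStep (pvSetCell g c.1 c.2) c) qt := by
        intro p hp
        by_cases hpqt : p ∈ qt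
        · exact fsub p hpqt
        · have hpc : p ≠ c := by
            rintro rfl
            exact absurd ((pvBoxP_setCell hs hec.1 p).mp hp.1).2 (by simp)
          have hpq : p ∉ c :: qt := by simp [hpc, hpqt]
          have hnel : ¬ pvEligP w g p := fun h => hpq (hcomp p h)
          have hbox : pvBoxP w g p := ((pvBoxP_setCell hs hec.1 p).mp hp.1).1
          have hcnt : 4 ≤ pvCnt w g p := by
            by_contra hx
            exact hnel ⟨hbox, by omega⟩
          have hlt : pvCnt w (pvSetCell g c.1 c.2) p < pvCnt w g p := by
            have := hp.2
            omega
          obtain ⟨d, hd, hflip1, hflip2⟩ := pvCountP_lt_exists hlt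
          simp only [decide_eq_true_eq, decide_eq_false_iff_not] at hflip1 hflip2
          have hpd : (p.1 + d.1, p.2 + d.2) = c := by
            by_contra hne
            exact hflip2 ((pvBoxP_setCell hs hec.1 _).mpr ⟨hflip1, hne⟩)
          have hneg := pvDirs_neg_mem d hd
          have hpe : (c.1 + -d.1, c.2 + -d.2) = p := by
            have h1 := congrArg Prod.fst hpd
            have h2 := congrArg Prod.snd hpd
            simp only at h1 h2
            have : c.1 + -d.1 = p.1 := by omega
            have : c.2 + -d.2 = p.2 := by omega
            simp_all [Prod.ext_iff]
          have := fd (-d.1, -d.2) hneg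
          simp only at this
          rw [hpe] at this
          exact this hp
      have hmu' : pvMu (pvSetCell g c.1 c.2)
          (pvDirs.foldl (pvAppendStep (pvSetCell g c.1 c.2) c) qt) ≤ m := by
        have := pvMu_decreases g c qt
        omega
      obtain ⟨l', g'', hrun, hfin, heq⟩ := ih (pvSetCell g c.1 c.2)
        (pvDirs.foldl (pvAppendStep (pvSetCell g c.1 c.2) c) qt) hmu' hs' fn fe hcomp'
      refine ⟨c :: l', g'', pvRun.cons hec hrun, hfin, ?_⟩
      intro removed
      rw [pvDoRemovals]
      rw [heq (removed + 1)]
      simp only [List.length_cons]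
      push_cast
      ring

-- the initial scan builds exactly the row-major list of currently eligible cells
theorem pvInitQueue_eq (grid : List (List Char)) :
    ((List.range grid.length).foldl (fun q (cr : Nat) =>
      (List.range (grid.headD []).length).foldl (fun q (cc : Nat) =>
        if (pvGat grid (cr : Int) (cc : Int) == '@')
            && decide (pvCheckNeighbours grid (cr : Int) (cc : Int) < 4) then
          q ++ [((cr : Int), (cc : Int))]
        else q) q) ([] : List (Int × Int))) =
    pvScan grid.length (grid.headD []).length
      (fun r c => (pvGat grid (r : Int) (c : Int) == '@')
        && decide (pvCheckNeighbours grid (r : Int) (c : Int) < 4)) := by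
  unfold pvScan
  have hinner : ∀ (cr : Nat) (q0 : List (Int × Int)),
      (List.range (grid.headD []).length).foldl (fun q (cc : Nat) =>
        if (pvGat grid (cr : Int) (cc : Int) == '@')
            && decide (pvCheckNeighbours grid (cr : Int) (cc : Int) < 4) then
          q ++ [((cr : Int), (cc : Int))]
        else q) q0 =
      q0 ++ ((List.range (grid.headD []).length).filter
        (fun (cc : Nat) => (pvGat grid (cr : Int) (cc : Int) == '@')
          && decide (pvCheckNeighbours grid (cr : Int) (cc : Int) < 4))).map
        (fun (cc : Nat) => ((cr : Int), (cc : Int))) := by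
    intro cr q0
    exact PySem.List.foldl_append_if
      (fun (cc : Nat) => (pvGat grid (cr : Int) (cc : Int) == '@')
        && decide (pvCheckNeighbours grid (cr : Int) (cc : Int) < 4))
      (fun (cc : Nat) => ((cr : Int), (cc : Int))) _ q0
  simp only [hinner]
  rw [PySem.List.foldl_append_eq_flatMap]
  simp

theorem part_two_eq_alt (data_input : List String) (hpre : Pre_part_two data_input) :
    part_two data_input = part_two_alt data_input := by
  set grid := data_input.map (fun s => s.toList) with hgrid
  set w := (grid.headD []).length with hw
  have hw' : w = (data_input.headD "").length := by
    cases data_input with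
    | nil => simp [hw, hgrid]
    | cons s t =>
      rw [hw, hgrid]
      simp only [List.map_cons, List.headD_cons]
      exact String.length_toList
  have hs : pvShape w grid := by
    refine ⟨rfl, ?_⟩
    intro row hrow
    rw [hgrid, List.mem_map] at hrow
    obtain ⟨s, hsmem, rfl⟩ := hrow
    have := hpre s hsmem
    rw [hw', String.length_toList]
    exact this
  -- characterise the initial queue
  set Q : Nat → Nat → Bool := fun r c => (pvGat grid (r : Int) (c : Int) == '@')
    && decide (pvCheckNeighbours grid (r : Int) (c : Int) < 4) with hQ
  have hqelig : ∀ p, p ∈ pvScan grid.length w Q ↔ pvEligP w grid p := by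
    intro p
    rw [pvScan_mem]
    constructor
    · rintro ⟨h1, h2, h3, h4, hq⟩
      rw [hQ] at hq
      simp only [Bool.and_eq_true, beq_iff_eq, decide_eq_true_eq] at hq
      rw [Int.toNat_of_nonneg h1, Int.toNat_of_nonneg h3] at hq
      refine ⟨⟨h1, h2, h3, h4, hq.1⟩, ?_⟩
      rw [← pvCheckNeighbours_lt4 hs]
      exact hq.2
    · rintro ⟨⟨h1, h2, h3, h4, h5⟩, hcnt⟩
      refine ⟨h1, h2, h3, h4, ?_⟩
      rw [hQ]
      simp only [Bool.and_eq_true, beq_iff_eq, decide_eq_true_eq]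
      rw [Int.toNat_of_nonneg h1, Int.toNat_of_nonneg h3]
      exact ⟨h5, (pvCheckNeighbours_lt4 hs _ _).mpr hcnt⟩
  have hA : part_two data_input = pvDoRemovals grid (pvScan grid.length w Q) 0 := by
    rw [part_two]
    rw [← hgrid, pvInitQueue_eq, ← hw, ← hQ]
  obtain ⟨lA, gA, hrunA, hfinA, heqA⟩ := pvDoRemovals_spec (w := w)
    (pvMu grid (pvScan grid.length w Q)) grid (pvScan grid.length w Q) le_rfl hs
    (pvScan_nodup _ _ _) (fun p hp => (hqelig p).mp hp) (fun p hp => (hqelig p).mpr hp)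
  have hB : part_two_alt data_input = pvBLoop grid w 0 := by
    rw [part_two_alt]
    have : (if data_input ≠ [] then (data_input.headD "").length else 0) = w := by
      cases data_input with
      | nil => simp [hw, hgrid]
      | cons s t => simp [hw']
    rw [this, ← hgrid]
  obtain ⟨lB, gB, hrunB, hfinB, heqB⟩ := pvBLoop_spec (w := w) (pvBoxTotal grid) grid le_rfl hs
  have hlen : lA.length = lB.length :=
    Nat.le_antisymm (pvRun_length_le hrunA hrunB hs hfinB) (pvRun_length_le hrunB hrunA hs hfinA)
  rw [hA, hB, heqA 0, heqB 0, hlen]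

-- ===== VERDICT (by name: the statement is the Claim_ definition above) =====
theorem part_two_spec : Claim_equal_part_two := by
  intro data_input _ hpre
  unfold Spec_part_two
  exact part_two_eq_alt data_input hpre
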